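-- pv_equiv track=rewrite | github.com/Will-Harris00/Countdown | Countdown.py | word_combinations
-- ===== SOURCE A (Python) =====
-- def word_combinations(letters):
--     """Finds every combination of every length of the available characters"""
--     sorted_word = "".join(sorted(letters))
--     comblist = []
--     from itertools import combinations
--     # starting with the longest letter string count down to zero
--     for i in range(len(sorted_word), 0, -1):
--         # for each length of letter strings generate all possible combinations
--         for substringletterslist in combinations(sorted_word, i):
--             # for each combination of letters convert list to string
--             substringletters = "".join(substringletterslist)
--             comblist.append(substringletters)
--     # substring_letters should then be compared with a sorted_word_list
--     return comblist
-- ===== SOURCE B (Python) =====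
-- def word_combinations(letters):
--     """Finds every combination of every length of the available characters"""
--     sw = sorted(letters)
--     n = len(sw)
--     out = []
--
--     def gen(start, k, prefix):
--         # choose the next character at an index >= start, recurse for the rest
--         if k == 0:
--             out.append(prefix)
--             return
--         for i in range(start, n - k + 1):
--             gen(i + 1, k - 1, prefix + sw[i])
--
--     for k in range(n, 0, -1):
--         gen(0, k, "")
--     return out
-- ===== Notes on version B (the rewrite author's own statement) =====
-- stated objective: alternative
-- what changed: Replaces the itertools.combinations library call with an explicit recursive generator over the index space (choose the next character at an index >= start, recurse with a growing prefix), emitting the same strings in the same lexicographic-by-index order within each length, lengths n down to 1.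
import Mathlib
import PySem

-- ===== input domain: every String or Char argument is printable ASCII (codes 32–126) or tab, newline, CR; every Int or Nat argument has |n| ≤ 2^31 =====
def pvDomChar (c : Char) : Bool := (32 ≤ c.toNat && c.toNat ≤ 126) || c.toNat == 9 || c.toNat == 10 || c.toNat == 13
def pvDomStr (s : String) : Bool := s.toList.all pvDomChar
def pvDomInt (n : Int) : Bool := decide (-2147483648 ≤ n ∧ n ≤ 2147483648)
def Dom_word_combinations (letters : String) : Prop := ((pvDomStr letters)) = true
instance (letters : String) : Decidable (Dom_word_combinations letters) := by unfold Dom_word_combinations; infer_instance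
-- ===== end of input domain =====

-- B replaces the itertools.combinations library call by an explicit recursion over the
-- index space (choose the next index ≥ start, recurse), same values and order; objective: alternative.

-- ===== PORT A =====
-- itertools.combinations(pool, k) in its documented lexicographic-by-index order:
-- canonical recursive definition (take the head into the tuple, or skip it).
def combA : List Char → Nat → List (List Char)
  | _, 0 => [[]]
  | [], _ + 1 => []
  | c :: rest, k + 1 => (combA rest k).map (fun t => c :: t) ++ combA rest (k + 1)

def word_combinations (letters : String) : List String :=
  -- sorted_word = "".join(sorted(letters)) — kept as its list of characters
  let sorted_word := PySem.List.sorted letters.toList (fun c => c) false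
  (PySem.List.pyRange (sorted_word.length : Int) 0 (-1)).foldl
    (fun comblist i =>
      (combA sorted_word i.toNat).foldl
        (fun acc substringletterslist => acc ++ [String.ofList substringletterslist]) comblist)
    []

-- ===== PORT B =====
-- gen(start, k, prefix): for i in range(start, n - k + 1): gen(i+1, k-1, prefix + sw[i]);
-- appends prefix to out when k == 0.  (sw[i] is always in range here, so getD is exact;
-- the prefix string is kept as a list of characters, emitted via String.ofList.)
def genB (sw : List Char) (n : Nat) : Nat → Nat → List Char → List String → List String
  | _, 0, pre, out => out ++ [String.ofList pre]
  | start, k + 1, pre, out =>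
      (List.range' start (n - k - start)).foldl
        (fun acc i => genB sw n (i + 1) k (pre ++ [sw.getD i ' ']) acc) out

def word_combinations_alt (letters : String) : List String :=
  let sw := PySem.List.sorted letters.toList (fun c => c) false
  let n := sw.length
  (PySem.List.pyRange (n : Int) 0 (-1)).foldl
    (fun out k => genB sw n 0 k.toNat [] out) []

-- ===== PRECONDITION & SPEC =====
def Spec_word_combinations (letters : String) (out : List String) : Prop := out = word_combinations_alt letters
instance (letters : String) (out : List String) : Decidable (Spec_word_combinations letters out) := by unfold Spec_word_combinations; infer_instance

-- ===== CLAIM (what is proved, stated in full; the proofs are below) =====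
def Claim_equal_word_combinations : Prop := ∀ (letters : String), Dom_word_combinations letters → Spec_word_combinations letters (word_combinations letters)

-- ===== LEMMAS AND PROOFS =====

theorem combA_nil_of_short : ∀ (l : List Char) (k : Nat), l.length < k → combA l k = [] := by
  intro l
  induction l with
  | nil =>
    intro k h
    cases k with
    | zero => omega
    | succ k => rfl
  | cons c rest ih =>
    intro k h
    cases k with
    | zero => omega
    | succ k =>
      have h1 : rest.length < k := by simp at h; omega
      have h2 : rest.length < k + 1 := by omega
      simp [combA, ih k h1, ih (k+1) h2]

-- choosing the first index j of a (k+1)-combination, then the rest from the suffix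
theorem comb_flat (l : List Char) (k : Nat) :
    combA l (k + 1) =
      (List.range (l.length - k)).flatMap
        (fun j => (combA (l.drop (j + 1)) k).map (fun t => l.getD j ' ' :: t)) := by
  induction l generalizing k with
  | nil => simp [combA]
  | cons c rest ih =>
    by_cases hk : k ≤ rest.length
    · have hcnt : (c :: rest).length - k = (rest.length - k) + 1 := by
        simp; omega
      rw [hcnt, List.range_succ_eq_map, List.flatMap_cons, List.flatMap_map]
      show combA (c :: rest) (k + 1) = _
      rw [show combA (c :: rest) (k + 1)
            = (combA rest k).map (fun t => c :: t) ++ combA rest (k + 1) from rfl]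
      congr 1
      all_goals try simp
      rw [ih k]
      apply List.flatMap_congr
      intro j hj
      simp [List.getD]
    · have h1 : combA (c :: rest) (k + 1) = [] := by
        apply combA_nil_of_short; simp; omega
      have h2 : (c :: rest).length - k = 0 := by simp; omega
      rw [h1, h2]
      simp

-- getD through drop
theorem getD_drop (l : List Char) (s j : Nat) :
    (l.drop s).getD j ' ' = l.getD (s + j) ' ' := by
  simp [List.getD, List.getElem?_drop]

theorem gen_spec (sw : List Char) :
    ∀ (k start : Nat) (pre : List Char) (out : List String),
      genB sw sw.length start k pre out =
        out ++ (combA (sw.drop start) k).map (fun t => String.ofList (pre ++ t)) := by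
  intro k
  induction k with
  | zero => intro start pre out; simp [genB, combA]
  | succ k ih =>
    intro start pre out
    rw [show genB sw sw.length start (k+1) pre out
          = (List.range' start (sw.length - k - start)).foldl
              (fun acc i => genB sw sw.length (i + 1) k (pre ++ [sw.getD i ' ']) acc) out from rfl]
    have hfun : (fun (acc : List String) (i : Nat) =>
          genB sw sw.length (i + 1) k (pre ++ [sw.getD i ' ']) acc)
        = fun acc i => acc ++ (combA (sw.drop (i + 1)) k).map
            (fun t => String.ofList ((pre ++ [sw.getD i ' ']) ++ t)) := by
      funext acc i
      rw [ih]
    rw [hfun, PySem.List.foldl_append_eq_flatMap]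
    congr 1
    rw [List.range'_eq_map_range, List.flatMap_map, comb_flat]
    have hlen : (sw.drop start).length - k = sw.length - k - start := by
      simp [List.length_drop]; omega
    rw [hlen, List.map_flatMap]
    apply List.flatMap_congr
    intro j hj
    rw [List.drop_drop, getD_drop, List.map_map]
    have h1 : start + (j + 1) = start + j + 1 := by omega
    rw [h1]
    congr 1
    funext t
    simp

-- ===== VERDICT (by name: the statement is the Claim_ definition above) =====
theorem word_combinations_spec : Claim_equal_word_combinations := by
  intro letters _
  unfold Spec_word_combinations word_combinations word_combinations_alt
  apply PySem.List.foldl_congr_mem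
  intro acc i _
  rw [gen_spec]
  rw [List.drop_zero]
  rw [PySem.List.foldl_append_singleton_eq_map]
  simp
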